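-- pv_equiv track=rewrite | github.com/sdamico23/Calculator- | calculatorOp.py | findNextOpr
-- ===== SOURCE A (Python) =====
-- def findNextOpr(txt):
--     """
--         Takes a string and returns -1 if there is no operator in txt, otherwise returns
--         the position of the leftmost operator. +, -, *, / are all the 4 operators
--
--         >>> findNextOpr('  3*   4 - 5')
--         3
--         >>> findNextOpr('8   4 - 5')
--         6
--         >>> findNextOpr('89 4 5')
--         -1
--     """
--     if len(txt)<=0 or not isinstance(txt,str):
--         return "type error: findNextOpr"
--
--     # --- YOU CODE STARTS HERE
--     pos = 0
--     for i in range (0, len(txt)):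
--         if txt[i] == '+' or txt[i] == "-" or txt[i] == "*" or txt[i] == "/":
--             pos = i
--             return pos
--     return -1
-- ===== SOURCE B (Python) =====
-- def findNextOpr(txt):
--     if len(txt)<=0 or not isinstance(txt,str):
--         return "type error: findNextOpr"
--     best = -1
--     for c in '+-*/':
--         p = txt.find(c)
--         if p >= 0 and (best == -1 or p < best):
--             best = p
--     return best
-- ===== Notes on version B (the rewrite author's own statement) =====
-- stated objective: idiomatic
-- what changed: Instead of scanning txt character by character in Python with an early return, B calls the C-level str.find once per operator character and keeps the smallest non-negative position found.
-- outside the precondition, e.g. on findNextOpr(''): A returns 'type error: findNextOpr', B returns 'type error: findNextOpr'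
import Mathlib
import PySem

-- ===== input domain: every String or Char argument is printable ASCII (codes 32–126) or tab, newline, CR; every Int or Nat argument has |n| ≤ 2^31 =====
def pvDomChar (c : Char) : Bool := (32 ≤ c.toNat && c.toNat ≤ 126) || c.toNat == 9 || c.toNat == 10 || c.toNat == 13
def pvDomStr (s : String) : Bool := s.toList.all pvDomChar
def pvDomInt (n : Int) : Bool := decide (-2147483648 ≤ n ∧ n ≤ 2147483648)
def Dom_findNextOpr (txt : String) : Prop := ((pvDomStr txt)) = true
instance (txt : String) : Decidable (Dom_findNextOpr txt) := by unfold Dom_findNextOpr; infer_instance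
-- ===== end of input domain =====

-- B replaces A's character-by-character early-exit scan by one txt.find per operator character,
-- keeping the smallest non-negative position (idiomatic; same return value on Pre_).

-- ===== PORT A =====
-- the 'for i in range(0, len(txt))' loop with early return, as structural recursion carrying i
def findNextOprLoop : List Char → Int → Int
  | [], _ => -1
  | ch :: rest, i =>
    if ch = '+' ∨ ch = '-' ∨ ch = '*' ∨ ch = '/' then i
    else findNextOprLoop rest (i + 1)

def findNextOpr (txt : String) : Int := findNextOprLoop txt.toList 0

-- ===== PORT B =====
-- one step of B's 'for c in "+-*/"' loop: p = txt.find(c); keep the smaller non-negative position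
def findNextOprStep (txt : String) (best : Int) (c : Char) : Int :=
  let p := PySem.Str.find txt (String.singleton c)
  if 0 ≤ p ∧ (best = -1 ∨ p < best) then p else best

def findNextOpr_alt (txt : String) : Int :=
  "+-*/".toList.foldl (findNextOprStep txt) (-1)

-- ===== PRECONDITION & SPEC =====
-- Pre_ excludes only the empty string, on which A returns the string "type error: findNextOpr" instead of an int.
def Pre_findNextOpr (txt : String) : Prop := txt ≠ ""
instance (txt : String) : Decidable (Pre_findNextOpr txt) := by unfold Pre_findNextOpr; infer_instance
def pvWitness_findNextOpr : String := "3+4"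

def Spec_findNextOpr (txt : String) (out : Int) : Prop := out = findNextOpr_alt txt
instance (txt : String) (out : Int) : Decidable (Spec_findNextOpr txt out) := by unfold Spec_findNextOpr; infer_instance

-- ===== CLAIM (what is proved, stated in full; the proofs are below) =====
def Claim_equal_findNextOpr : Prop := ∀ (txt : String), Dom_findNextOpr txt → Pre_findNextOpr txt → Spec_findNextOpr txt (findNextOpr txt)

-- ===== LEMMAS AND PROOFS =====

-- '-1, or shifted right by one' — how both a find and A's loop react to a prepended non-operator
def pvShift (x : Int) : Int := if x = -1 then -1 else x + 1

-- B's loop body abstracted over the found position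
def pvStep (best p : Int) : Int := if 0 ≤ p ∧ (best = -1 ∨ p < best) then p else best

-- list-level form of B (the foldl over "+-*/" written out)
def altL (l : List Char) : Int :=
  pvStep (pvStep (pvStep (pvStep (-1) (PySem.Chars.find l ['+'])) (PySem.Chars.find l ['-']))
    (PySem.Chars.find l ['*'])) (PySem.Chars.find l ['/'])

lemma ops_list : "+-*/".toList = ['+', '-', '*', '/'] := rfl

lemma alt_eq (txt : String) : findNextOpr_alt txt = altL txt.toList := by
  rw [findNextOpr_alt, ops_list]
  simp only [List.foldl_cons, List.foldl_nil, findNextOprStep, PySem.Str.find_eq,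
    String.toList_singleton, altL, pvStep]

lemma step_zero (p : Int) : pvStep 0 p = 0 := by
  unfold pvStep
  rw [if_neg]
  rintro ⟨h1, h2 | h2⟩
  · exact absurd h2 (by norm_num)
  · omega

lemma step_zero_val (b : Int) (hb : b = -1 ∨ 1 ≤ b) : pvStep b 0 = 0 := by
  unfold pvStep
  rw [if_pos ⟨le_refl 0, by omega⟩]

lemma step_inv (b : Int) (hb : b = -1 ∨ 1 ≤ b) (y : Int) (hy : -1 ≤ y) :
    pvStep b (pvShift y) = -1 ∨ 1 ≤ pvStep b (pvShift y) := by
  unfold pvStep pvShift; split_ifs <;> omega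

lemma step_shift (x y : Int) (hx : -1 ≤ x) (hy : -1 ≤ y) :
    pvStep (pvShift x) (pvShift y) = pvShift (pvStep x y) := by
  simp only [pvStep, pvShift]
  split_ifs <;> omega

lemma step_ge (x y : Int) (hx : -1 ≤ x) (hy : -1 ≤ y) : -1 ≤ pvStep x y := by
  simp only [pvStep]; split_ifs <;> omega

lemma find_single_nil (c : Char) : PySem.Chars.find [] [c] = -1 := by
  simp [PySem.Chars.find, PySem.Chars.find.go]

lemma goShift (c : Char) (t : List Char) (k : Nat) :
    PySem.Chars.find.go [c] t (k + 1) = pvShift (PySem.Chars.find.go [c] t k) := by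
  induction t generalizing k with
  | nil => simp [PySem.Chars.find.go, pvShift]
  | cons hd tl ih =>
    by_cases h : List.isPrefixOf [c] (hd :: tl) = true
    · simp [PySem.Chars.find.go, h, pvShift]
    · simp only [PySem.Chars.find.go, h, if_false, Bool.false_eq_true]
      exact ih (k + 1)

lemma find_cons_self (c : Char) (t : List Char) : PySem.Chars.find (c :: t) [c] = 0 := by
  simp [PySem.Chars.find, PySem.Chars.find.go, List.isPrefixOf]

lemma find_cons_ne (c c' : Char) (t : List Char) (h : c' ≠ c) :
    PySem.Chars.find (c :: t) [c'] = pvShift (PySem.Chars.find t [c']) := by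
  have hp : List.isPrefixOf [c'] (c :: t) = false := by
    simp [List.isPrefixOf]
    intro hc; exact absurd hc h
  simp only [PySem.Chars.find, PySem.Chars.find.go, hp, Bool.false_eq_true, if_false]
  exact goShift c' t 0

lemma loop_succ (l : List Char) (i : Int) (hi : 0 ≤ i) :
    findNextOprLoop l (i + 1) = pvShift (findNextOprLoop l i) := by
  induction l generalizing i with
  | nil => simp [findNextOprLoop, pvShift]
  | cons hd tl ih =>
    by_cases h : hd = '+' ∨ hd = '-' ∨ hd = '*' ∨ hd = '/'
    · simp [findNextOprLoop, h, pvShift]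
      omega
    · simp only [findNextOprLoop, h, if_false]
      exact ih (i + 1) (by omega)

lemma loop_eq_altL (l : List Char) : findNextOprLoop l 0 = altL l := by
  induction l with
  | nil =>
    simp [findNextOprLoop, altL, find_single_nil, pvStep]
  | cons c t ih =>
    by_cases h : c = '+' ∨ c = '-' ∨ c = '*' ∨ c = '/'
    · have h0 : findNextOprLoop (c :: t) 0 = 0 := by simp [findNextOprLoop, h]
      rw [h0]
      have f1 := PySem.Chars.neg_one_le_find t ['+']
      have f2 := PySem.Chars.neg_one_le_find t ['-']
      have f3 := PySem.Chars.neg_one_le_find t ['*']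
      have f4 := PySem.Chars.neg_one_le_find t ['/']
      rcases h with h | h | h | h <;> subst h
      · rw [altL, find_cons_self,
          find_cons_ne _ '-' t (by decide), find_cons_ne _ '*' t (by decide),
          find_cons_ne _ '/' t (by decide),
          step_zero_val (-1) (Or.inl rfl), step_zero, step_zero, step_zero]
      · rw [altL, find_cons_self,
          find_cons_ne _ '+' t (by decide), find_cons_ne _ '*' t (by decide),
          find_cons_ne _ '/' t (by decide),
          step_zero_val _ (step_inv (-1) (Or.inl rfl) _ f1), step_zero, step_zero]
      · rw [altL, find_cons_self,
          find_cons_ne _ '+' t (by decide), find_cons_ne _ '-' t (by decide),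
          find_cons_ne _ '/' t (by decide),
          step_zero_val _ (step_inv _ (step_inv (-1) (Or.inl rfl) _ f1) _ f2), step_zero]
      · rw [altL, find_cons_self,
          find_cons_ne _ '+' t (by decide), find_cons_ne _ '-' t (by decide),
          find_cons_ne _ '*' t (by decide),
          step_zero_val _ (step_inv _ (step_inv _ (step_inv (-1) (Or.inl rfl) _ f1) _ f2) _ f3)]
    · have hA : findNextOprLoop (c :: t) 0 = pvShift (findNextOprLoop t 0) := by
        simp only [findNextOprLoop, h, if_false]
        simpa using loop_succ t 0 le_rfl
      simp only [not_or] at h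
      obtain ⟨h1, h2, h3, h4⟩ := h
      have f1 := PySem.Chars.neg_one_le_find t ['+']
      have f2 := PySem.Chars.neg_one_le_find t ['-']
      have f3 := PySem.Chars.neg_one_le_find t ['*']
      have f4 := PySem.Chars.neg_one_le_find t ['/']
      rw [hA, ih]
      rw [altL, altL,
        find_cons_ne c '+' t (Ne.symm h1), find_cons_ne c '-' t (Ne.symm h2),
        find_cons_ne c '*' t (Ne.symm h3), find_cons_ne c '/' t (Ne.symm h4),
        show (-1 : Int) = pvShift (-1) from rfl,
        step_shift _ _ (by norm_num) f1,
        step_shift _ _ (step_ge _ _ (by norm_num) f1) f2,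
        step_shift _ _ (step_ge _ _ (step_ge _ _ (by norm_num) f1) f2) f3,
        step_shift _ _ (step_ge _ _ (step_ge _ _ (step_ge _ _ (by norm_num) f1) f2) f3) f4]
      rfl

-- ===== VERDICT (by name: the statement is the Claim_ definition above) =====
theorem findNextOpr_spec : Claim_equal_findNextOpr := by
  intro txt _ _
  unfold Spec_findNextOpr findNextOpr
  rw [loop_eq_altL, alt_eq]
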